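-- pv_equiv track=rewrite | github.com/vigneshsabapathi/python-algorithms | matrix/matrix_equalization_optimized.py | equalize_counter
-- ===== SOURCE A (Python) =====
-- from collections import Counter
--
-- def equalize_counter(vector: list[int], step_size: int) -> int:
--     """
--     Use Counter to pre-compute frequencies, then simulate step-based
--     updates for top candidates only.
--
--     >>> equalize_counter([1, 1, 6, 2, 4, 6, 5, 1, 7, 2, 2, 1, 7, 2, 2], 4)
--     4
--     >>> equalize_counter([0, 0, 0, 0, 0, 0, 0, 0, 0, 0, 0, 0], 5)
--     0
--     >>> equalize_counter([22, 22, 22, 33, 33, 33], 2)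
--     2
--     """
--     if step_size <= 0:
--         raise ValueError("Step size must be positive and non-zero.")
--     if not isinstance(step_size, int):
--         raise ValueError("Step size must be an integer.")
--
--     freq = Counter(vector)
--     min_updates = len(vector)
--
--     for element in freq:
--         idx = 0
--         updates = 0
--         while idx < len(vector):
--             if vector[idx] != element:
--                 updates += 1
--                 idx += step_size
--             else:
--                 idx += 1
--         min_updates = min(min_updates, updates)
--
--     return min_updates
-- ===== SOURCE B (Python) =====
-- from bisect import bisect_left
--
-- def equalize_counter(vector: list[int], step_size: int) -> int:
--     if step_size <= 0:
--         raise ValueError("Step size must be positive and non-zero.")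
--     n = len(vector)
--     positions = {}
--     for i, v in enumerate(vector):
--         positions.setdefault(v, []).append(i)
--     best = n
--     for v, plist in positions.items():
--         res = {}
--         for p in plist:
--             res.setdefault(p % step_size, []).append(p)
--         idx = 0
--         updates = 0
--         while idx < n:
--             j = bisect_left(plist, idx)
--             if j < len(plist) and plist[j] == idx:
--                 while j + 1 < len(plist) and plist[j + 1] == plist[j] + 1:
--                     j += 1
--                 idx = plist[j] + 1
--             else:
--                 lst = res.get(idx % step_size, [])
--                 m = bisect_left(lst, idx)
--                 if m < len(lst):
--                     p = lst[m]
--                     updates += (p - idx) // step_size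
--                     idx = p
--                 else:
--                     updates += -((idx - n) // step_size)
--                     idx = n
--         best = min(best, updates)
--     return best
-- ===== Notes on version B (the rewrite author's own statement) =====
-- stated objective: alternative
-- what changed: Instead of re-scanning the vector element by element for every candidate value, B groups positions once by value and, per candidate, by residue mod step_size, and crosses each run of matches and each block of skipped indices with one binary search; it trades A's simple skip-walk (cheap when step_size is large) for batched jumps that bound each candidate's walk by its number of runs.
import Mathlib
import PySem

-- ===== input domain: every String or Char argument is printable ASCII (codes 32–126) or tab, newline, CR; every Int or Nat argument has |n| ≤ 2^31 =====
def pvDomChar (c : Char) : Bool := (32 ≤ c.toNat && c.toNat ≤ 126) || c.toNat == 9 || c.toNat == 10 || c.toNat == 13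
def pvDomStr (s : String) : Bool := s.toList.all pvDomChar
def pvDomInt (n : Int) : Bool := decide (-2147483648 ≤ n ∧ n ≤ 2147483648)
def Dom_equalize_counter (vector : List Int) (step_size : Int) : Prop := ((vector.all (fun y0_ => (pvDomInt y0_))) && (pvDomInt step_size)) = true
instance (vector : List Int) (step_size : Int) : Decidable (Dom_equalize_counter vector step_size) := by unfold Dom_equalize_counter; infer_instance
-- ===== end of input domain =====

-- B replaces A's per-candidate element-by-element skip walk by batched jumps: positions are grouped
-- by value and by residue mod step_size, and each run of matches / block of skips is crossed in one
-- binary search (objective: alternative algorithm, same return value).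

-- ===== PORT A =====
-- A's inner while loop; fuel = vector.length is exact: under Pre_ (step_size ≥ 1) idx strictly
-- increases each iteration, so at most vector.length iterations run before idx ≥ len(vector).
-- vector[idx] is read only under the guard 0 ≤ idx < len, where pyGetD _ _ 0 is exact.
def walkA (vector : List Int) (step_size : Int) (element : Int) : Nat → Int → Int → Int
  | 0, _idx, updates => updates
  | fuel+1, idx, updates =>
    if idx < (vector.length : Int) then
      if PySem.List.pyGetD vector idx 0 ≠ element then
        walkA vector step_size element fuel (idx + step_size) (updates + 1)
      else
        walkA vector step_size element fuel (idx + 1) updates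
    else updates

def equalize_counter (vector : List Int) (step_size : Int) : Int :=
  -- Python raises ValueError when step_size ≤ 0 (excluded by Pre_); the isinstance check never fires.
  if step_size ≤ 0 then 0
  else
    let freq := PySem.Dict.counter (κ := Int) vector
    freq.keys.foldl
      (fun min_updates element =>
        min min_updates (walkA vector step_size element vector.length 0 0))
      (vector.length : Int)

-- ===== PORT B =====
-- Source B's inner `while j + 1 < len(plist) and plist[j+1] == plist[j] + 1: j += 1`.
def advanceRun (plist : List Int) (j : Nat) : Nat :=
  if h : j + 1 < plist.length ∧ plist.getD (j+1) 0 = plist.getD j 0 + 1 then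
    advanceRun plist (j+1)
  else j
termination_by plist.length - j
decreasing_by omega

-- Source B's while loop; fuel = vector.length is exact for the same reason as in walkA: idx strictly
-- increases each iteration. Python list indices here are nonnegative and in range, so List.getD is exact.
def walkB (vector : List Int) (step_size : Int) (plist : List Int)
    (res : PySem.Dict Int (List Int)) : Nat → Int → Int → Int
  | 0, _idx, updates => updates
  | fuel+1, idx, updates =>
    if idx < (vector.length : Int) then
      let j := PySem.List.bisectLeft plist idx
      if j < plist.length ∧ plist.getD j 0 = idx then
        let j' := advanceRun plist j
        walkB vector step_size plist res fuel (plist.getD j' 0 + 1) updates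
      else
        let lst := res.getD (PySem.Int.mod idx step_size) []
        let m := PySem.List.bisectLeft lst idx
        if m < lst.length then
          let p := lst.getD m 0
          walkB vector step_size plist res fuel p
            (updates + PySem.Int.floordiv (p - idx) step_size)
        else
          walkB vector step_size plist res fuel (vector.length : Int)
            (updates + -(PySem.Int.floordiv (idx - (vector.length : Int)) step_size))
    else updates

def equalize_counter_alt (vector : List Int) (step_size : Int) : Int :=
  -- Python raises ValueError when step_size ≤ 0 (excluded by Pre_).
  if step_size ≤ 0 then 0
  else
    let n := (vector.length : Int)
    -- positions.setdefault(v, []).append(i)  over enumerate(vector)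
    let positions : PySem.Dict Int (List Int) :=
      (PySem.List.enumerate vector).foldl
        (fun d p => d.modify p.2 [] (fun l => l ++ [p.1])) PySem.Dict.empty
    positions.items.foldl
      (fun best vp =>
        let plist := vp.2
        -- res.setdefault(p % step_size, []).append(p)
        let res : PySem.Dict Int (List Int) :=
          plist.foldl
            (fun d p => d.modify (PySem.Int.mod p step_size) [] (fun l => l ++ [p]))
            PySem.Dict.empty
        min best (walkB vector step_size plist res vector.length 0 0))
      n

-- ===== PRECONDITION & SPEC =====
-- Pre_ excludes exactly the inputs where A raises ValueError ("Step size must be positive").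
def Pre_equalize_counter (vector : List Int) (step_size : Int) : Prop := 0 < step_size
instance (vector : List Int) (step_size : Int) : Decidable (Pre_equalize_counter vector step_size) := by unfold Pre_equalize_counter; infer_instance

def pvWitness_equalize_counter : List Int × Int := ([1, 1, 6, 2, 4, 6, 5, 1, 7, 2, 2, 1, 7, 2, 2], 4)

def Spec_equalize_counter (vector : List Int) (step_size : Int) (out : Int) : Prop := out = equalize_counter_alt vector step_size
instance (vector : List Int) (step_size : Int) (out : Int) : Decidable (Spec_equalize_counter vector step_size out) := by unfold Spec_equalize_counter; infer_instance

-- ===== CLAIM (what is proved, stated in full; the proofs are below) =====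
def Claim_equal_equalize_counter : Prop := ∀ (vector : List Int) (step_size : Int), Dom_equalize_counter vector step_size → Pre_equalize_counter vector step_size → Spec_equalize_counter vector step_size (equalize_counter vector step_size)

-- ===== LEMMAS AND PROOFS =====

theorem walkA_of_ge (v : List Int) (s e : Int) (f : Nat) (idx u : Int)
    (h : (v.length : Int) ≤ idx) : walkA v s e f idx u = u := by
  cases f with
  | zero => rfl
  | succ f => simp [walkA, not_lt.mpr h]


theorem walkA_run (v : List Int) (s e : Int) :
    ∀ (r fuel : Nat) (idx u : Int),
      (∀ k : Nat, k < r → idx + k < (v.length : Int) ∧ PySem.List.pyGetD v (idx + k) 0 = e) →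
      walkA v s e (r + fuel) idx u = walkA v s e fuel (idx + r) u := by
  intro r
  induction r with
  | zero => intro fuel idx u _; simp
  | succ r ih =>
    intro fuel idx u h
    have h0 := h 0 (by omega)
    simp only [Nat.cast_zero, add_zero] at h0
    rw [show r + 1 + fuel = (r + fuel) + 1 by omega]
    show walkA v s e ((r+fuel)+1) idx u = _
    rw [walkA]
    rw [if_pos h0.1, if_neg (by simp [h0.2])]
    have hsh : ∀ k : Nat, k < r → idx + 1 + k < (v.length : Int) ∧ PySem.List.pyGetD v (idx + 1 + k) 0 = e := by
      intro k hk
      have hx := h (k+1) (by omega)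
      push_cast at hx
      rw [show idx + 1 + (k:Int) = idx + ((k:Int) + 1) by ring]
      exact hx
    rw [ih fuel (idx + 1) u hsh]
    congr 1
    push_cast
    ring

theorem walkA_jump (v : List Int) (s e : Int) :
    ∀ (jn fuel : Nat) (idx u : Int),
      (∀ k : Nat, k < jn → idx + k * s < (v.length : Int) ∧ PySem.List.pyGetD v (idx + k * s) 0 ≠ e) →
      walkA v s e (jn + fuel) idx u = walkA v s e fuel (idx + jn * s) (u + jn) := by
  intro jn
  induction jn with
  | zero => intro fuel idx u _; simp
  | succ jn ih =>
    intro fuel idx u h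
    have h0 := h 0 (by omega)
    simp only [Nat.cast_zero, zero_mul, add_zero] at h0
    rw [show jn + 1 + fuel = (jn + fuel) + 1 by omega]
    show walkA v s e ((jn+fuel)+1) idx u = _
    rw [walkA]
    rw [if_pos h0.1, if_pos h0.2]
    have hsh : ∀ k : Nat, k < jn → idx + s + k * s < (v.length : Int) ∧ PySem.List.pyGetD v (idx + s + k * s) 0 ≠ e := by
      intro k hk
      have hx := h (k+1) (by omega)
      push_cast at hx
      rw [show idx + s + (k:Int) * s = idx + ((k:Int) + 1) * s by ring]
      exact hx
    rw [ih fuel (idx + s) (u + 1) hsh]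
    congr 1
    · push_cast; ring
    · push_cast; ring

theorem advanceRun_spec (plist : List Int) : ∀ (j : Nat), j < plist.length →
    j ≤ advanceRun plist j ∧ advanceRun plist j < plist.length ∧
    (∀ k : Nat, j ≤ k → k ≤ advanceRun plist j → plist.getD k 0 = plist.getD j 0 + ((k : Int) - (j : Int))) := by
  intro j hj
  induction j using advanceRun.induct plist with
  | case1 j h ih =>
    rw [advanceRun, dif_pos h]
    have := ih h.1
    refine ⟨by omega, this.2.1, ?_⟩
    intro k hjk hkar
    rcases Nat.eq_or_lt_of_le hjk with heq | hlt
    · subst heq; simp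
    · have hk := this.2.2 k hlt hkar
      rw [hk, h.2]
      push_cast
      ring
  | case2 j h =>
    rw [advanceRun, dif_neg h]
    refine ⟨le_refl j, hj, ?_⟩
    intro k hjk hkj
    have : k = j := by omega
    subst this; simp

-- bisect helpers on a strictly sorted Int list
theorem bisect_found (xs : List Int) (x : Int) (hs : xs.Pairwise (· < ·)) (hx : x ∈ xs) :
    PySem.List.bisectLeft xs x < xs.length ∧ xs.getD (PySem.List.bisectLeft xs x) 0 = x := by
  obtain ⟨i, hi, hxi⟩ := List.mem_iff_getElem.mp hx
  obtain ⟨hle, hlt', hge'⟩ := PySem.List.bisectLeft_spec xs x (hs.imp le_of_lt)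
  set m := PySem.List.bisectLeft xs x with hm
  have him : m ≤ i := by
    by_contra hc
    have := hlt' i hi (by omega)
    omega
  have hmlen : m < xs.length := by omega
  refine ⟨hmlen, ?_⟩
  rw [List.getD_eq_getElem xs 0 hmlen]
  have h1 : x ≤ xs[m] := hge' m hmlen (le_refl m)
  have h2 : xs[m] ≤ xs[i] := by
    rcases Nat.lt_or_ge m i with hlt | hge
    · exact le_of_lt (List.pairwise_iff_getElem.mp hs m i hmlen hi hlt)
    · have : m = i := by omega
      simp [this]
  omega

theorem bisect_ge (xs : List Int) (x : Int) (hs : xs.Pairwise (· < ·))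
    (hlt : PySem.List.bisectLeft xs x < xs.length) :
    x ≤ xs.getD (PySem.List.bisectLeft xs x) 0 ∧
    (∀ q ∈ xs, x ≤ q → xs.getD (PySem.List.bisectLeft xs x) 0 ≤ q) := by
  obtain ⟨hle, hlt', hge'⟩ := PySem.List.bisectLeft_spec xs x (hs.imp le_of_lt)
  set m := PySem.List.bisectLeft xs x with hm
  rw [List.getD_eq_getElem xs 0 hlt]
  refine ⟨hge' m hlt (le_refl m), ?_⟩
  intro q hq hxq
  obtain ⟨i, hi, hqi⟩ := List.mem_iff_getElem.mp hq
  have him : m ≤ i := by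
    by_contra hc
    have := hlt' i hi (by omega)
    omega
  rcases Nat.lt_or_ge m i with hmi | hmi
  · have := List.pairwise_iff_getElem.mp hs m i hlt hi hmi
    omega
  · have : m = i := by omega
    subst hqi; simp [this]

theorem bisect_none (xs : List Int) (x : Int) (hs : xs.Pairwise (· < ·))
    (hge : ¬ PySem.List.bisectLeft xs x < xs.length) :
    ∀ q ∈ xs, q < x := by
  obtain ⟨hle, hlt', hge'⟩ := PySem.List.bisectLeft_spec xs x (hs.imp le_of_lt)
  intro q hq
  obtain ⟨i, hi, hqi⟩ := List.mem_iff_getElem.mp hq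
  have := hlt' i hi (by omega)
  omega

theorem mod_eq_of_dvd_sub (a c b : Int) (hb : 0 < b) (h : b ∣ a - c) :
    PySem.Int.mod a b = PySem.Int.mod c b := by
  rw [PySem.Int.mod_eq_emod_of_pos hb, PySem.Int.mod_eq_emod_of_pos hb]
  exact (Int.modEq_iff_dvd.mpr (by simpa using h)).symm

theorem walkB_of_ge (v : List Int) (s : Int) (plist : List Int) (res : PySem.Dict Int (List Int))
    (f : Nat) (idx u : Int) (h : (v.length : Int) ≤ idx) : walkB v s plist res f idx u = u := by
  cases f with
  | zero => rfl
  | succ f => rw [walkB, if_neg (by omega)]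

theorem dvd_of_mod_eq (a c b : Int) (hb : 0 < b) (h : PySem.Int.mod a b = PySem.Int.mod c b) :
    b ∣ a - c := by
  rw [PySem.Int.mod_eq_emod_of_pos hb, PySem.Int.mod_eq_emod_of_pos hb] at h
  simpa using (Int.ModEq.dvd (Int.ModEq.symm h))

theorem walk_eq (v : List Int) (s e : Int) (plist : List Int) (res : PySem.Dict Int (List Int))
    (hstep : 0 < s)
    (hmem : ∀ q : Int, q ∈ plist ↔ 0 ≤ q ∧ q < (v.length : Int) ∧ PySem.List.pyGetD v q 0 = e)
    (hsorted : plist.Pairwise (· < ·))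
    (hres : ∀ r : Int, res.getD r [] = plist.filter (fun p => PySem.Int.mod p s == r)) :
    ∀ (fB : Nat) (idx u : Int) (fA : Nat), 0 ≤ idx →
      (v.length : Int) ≤ idx + fA → (v.length : Int) ≤ idx + fB →
      walkA v s e fA idx u = walkB v s plist res fB idx u := by
  intro fB
  induction fB with
  | zero =>
    intro idx u fA h0 hA hB
    rw [walkB_of_ge _ _ _ _ _ _ _ (by push_cast at hB ⊢; omega)]
    exact walkA_of_ge _ _ _ _ _ _ (by push_cast at hB ⊢; omega)
  | succ fB ih =>
    intro idx u fA h0 hA hB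
    by_cases hidx : idx < (v.length : Int)
    · rw [walkB]
      simp only [if_pos hidx]
      by_cases hrun : PySem.List.bisectLeft plist idx < plist.length ∧
          plist.getD (PySem.List.bisectLeft plist idx) 0 = idx
      · rw [if_pos hrun]
        obtain ⟨hjlt, hjval⟩ := hrun
        obtain ⟨hjle, hj'lt, hconsec⟩ := advanceRun_spec plist (PySem.List.bisectLeft plist idx) hjlt
        set j := PySem.List.bisectLeft plist idx with hj
        set j' := advanceRun plist j with hj'
        set r : Nat := j' - j + 1 with hr
        have hrange : ∀ k : Nat, k < r → idx + k < (v.length : Int) ∧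
            PySem.List.pyGetD v (idx + k) 0 = e := by
          intro k hk
          have hjklt : j + k < plist.length := by omega
          have hget : plist.getD (j + k) 0 = idx + k := by
            rw [hconsec (j + k) (by omega) (by omega), hjval]; push_cast; ring
          have hmemk : plist.getD (j + k) 0 ∈ plist := by
            rw [List.getD_eq_getElem plist 0 hjklt]; exact List.getElem_mem _
          rw [hget] at hmemk
          have := (hmem _).mp hmemk
          exact ⟨this.2.1, this.2.2⟩
        have hrle : r ≤ fA := by
          have := (hrange (r - 1) (by omega)).1
          omega
        rw [show fA = r + (fA - r) by omega, walkA_run v s e r (fA - r) idx u hrange]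
        have hidx' : plist.getD j' 0 + 1 = idx + (r : Int) := by
          rw [hconsec j' hjle (le_refl j'), hjval]; push_cast; omega
        rw [hidx']
        exact ih (idx + (r : Int)) u (fA - r) (by omega) (by push_cast; omega) (by push_cast; omega)
      · rw [if_neg hrun]
        -- idx is not a position of e
        have hnotmem : PySem.List.pyGetD v idx 0 ≠ e := by
          intro hcontra
          exact hrun (bisect_found plist idx hsorted ((hmem idx).mpr ⟨h0, hidx, hcontra⟩))
        have hlst : res.getD (PySem.Int.mod idx s) [] =
            plist.filter (fun p => PySem.Int.mod p s == PySem.Int.mod idx s) := hres _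
        have hlstsorted : (res.getD (PySem.Int.mod idx s) []).Pairwise (· < ·) := by
          rw [hlst]; exact List.Pairwise.sublist List.filter_sublist hsorted
        by_cases hm : PySem.List.bisectLeft (res.getD (PySem.Int.mod idx s) []) idx <
            (res.getD (PySem.Int.mod idx s) []).length
        · rw [if_pos hm]
          set L := res.getD (PySem.Int.mod idx s) [] with hLdef
          set m := PySem.List.bisectLeft L idx with hmdef
          set p := L.getD m 0 with hpdef
          have hpmem : p ∈ L := by
            rw [hpdef, List.getD_eq_getElem L 0 hm]; exact List.getElem_mem _
          have hpfilter := hlst ▸ hpmem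
          have hpplist : p ∈ plist := List.mem_of_mem_filter hpfilter
          have hpmod : PySem.Int.mod p s = PySem.Int.mod idx s := by
            have := List.of_mem_filter hpfilter
            simpa using this
          obtain ⟨hp0, hpn, hpe⟩ := (hmem p).mp hpplist
          have hpge : idx ≤ p := (bisect_ge L idx hlstsorted hm).1
          have hpmin : ∀ q ∈ L, idx ≤ q → p ≤ q := (bisect_ge L idx hlstsorted hm).2
          have hpgt : idx < p := by
            rcases lt_or_eq_of_le hpge with h' | h'
            · exact h'
            · exact absurd (h' ▸ hpe) hnotmem
          obtain ⟨t, ht⟩ := dvd_of_mod_eq p idx s hstep hpmod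
          have ht1 : 1 ≤ t := by nlinarith
          set jn : Nat := t.toNat with hjndef
          have hjnt : (jn : Int) = t := Int.toNat_of_nonneg (by omega)
          have hp_eq : p = idx + (jn : Int) * s := by rw [hjnt]; linear_combination ht
          have hjump : ∀ k : Nat, k < jn → idx + (k : Int) * s < (v.length : Int) ∧
              PySem.List.pyGetD v (idx + (k : Int) * s) 0 ≠ e := by
            intro k hk
            have hkt : (k : Int) ≤ t - 1 := by omega
            have hks : (k : Int) * s ≤ (t - 1) * s :=
              mul_le_mul_of_nonneg_right hkt (le_of_lt hstep)
            have hqlt : idx + (k : Int) * s < p := by nlinarith [mul_comm s t]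
            refine ⟨by linarith, ?_⟩
            intro hcontra
            have hq0 : (0 : Int) ≤ (k : Int) * s := by positivity
            have hqplist : idx + (k : Int) * s ∈ plist :=
              (hmem _).mpr ⟨by linarith, by linarith, hcontra⟩
            have hqmod : PySem.Int.mod (idx + (k : Int) * s) s = PySem.Int.mod idx s := by
              apply mod_eq_of_dvd_sub _ _ _ hstep
              rw [show idx + (k : Int) * s - idx = (k : Int) * s by ring]
              exact dvd_mul_left s (k : Int)
            have hqL : idx + (k : Int) * s ∈ L := by
              rw [hlst]
              exact List.mem_filter.mpr ⟨hqplist, by simp [hqmod]⟩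
            have := hpmin _ hqL (by linarith)
            linarith
          have hjn1 : (jn : Int) ≤ (jn : Int) * s :=
            le_mul_of_one_le_right (by positivity) (by omega)
          have hjnle : jn ≤ fA := by
            have hlin : (jn : Int) ≤ (fA : Int) := by linarith [hjn1, hp_eq, hpn, hA]
            omega
          rw [show fA = jn + (fA - jn) by omega, walkA_jump v s e jn (fA - jn) idx u hjump]
          have hfd : PySem.Int.floordiv (p - idx) s = (jn : Int) := by
            rw [PySem.Int.floordiv_eq_ediv_of_pos hstep, ht, hjnt]
            exact Int.mul_ediv_cancel_left t (ne_of_gt hstep)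
          rw [hfd, ← hp_eq]
          have hcast : ((fA - jn : Nat) : Int) = (fA : Int) - (jn : Int) := by push_cast; omega
          exact ih p (u + (jn : Int)) (fA - jn) (by omega) (by rw [hcast]; linarith [hjn1, hp_eq, hA]) (by omega)
        · rw [if_neg hm]
          set L := res.getD (PySem.Int.mod idx s) [] with hLdef
          have hall : ∀ q ∈ L, q < idx := bisect_none L idx hlstsorted hm
          set c := -(PySem.Int.floordiv (idx - (v.length : Int)) s) with hcdef
          have hbounds : (c - 1) * s < (v.length : Int) - idx ∧ (v.length : Int) - idx ≤ c * s := by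
            refine (PySem.Int.neg_floordiv_neg_eq_iff_of_pos hstep).mp ?_
            rw [hcdef, show -((v.length : Int) - idx) = idx - (v.length : Int) by ring]
          have hc1 : 1 ≤ c := by nlinarith [hbounds.2]
          set cn : Nat := c.toNat with hcndef
          have hcnc : (cn : Int) = c := Int.toNat_of_nonneg (by omega)
          have hjump : ∀ k : Nat, k < cn → idx + (k : Int) * s < (v.length : Int) ∧
              PySem.List.pyGetD v (idx + (k : Int) * s) 0 ≠ e := by
            intro k hk
            have hkt : (k : Int) ≤ c - 1 := by omega
            have hks : (k : Int) * s ≤ (c - 1) * s :=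
              mul_le_mul_of_nonneg_right hkt (le_of_lt hstep)
            refine ⟨by linarith [hks, hbounds.1], ?_⟩
            intro hcontra
            have hq0 : (0 : Int) ≤ (k : Int) * s := by positivity
            have hqplist : idx + (k : Int) * s ∈ plist :=
              (hmem _).mpr ⟨by linarith, by linarith [hks, hbounds.1], hcontra⟩
            have hqmod : PySem.Int.mod (idx + (k : Int) * s) s = PySem.Int.mod idx s := by
              apply mod_eq_of_dvd_sub _ _ _ hstep
              rw [show idx + (k : Int) * s - idx = (k : Int) * s by ring]
              exact dvd_mul_left s (k : Int)
            have hqL : idx + (k : Int) * s ∈ L := by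
              rw [hlst]
              exact List.mem_filter.mpr ⟨hqplist, by simp [hqmod]⟩
            have := hall _ hqL
            linarith
          have hcn1 : (c : Int) - 1 ≤ ((c : Int) - 1) * s :=
            le_mul_of_one_le_right (by omega) (by omega)
          have hcnle : cn ≤ fA := by
            have hlin : c - 1 < (v.length : Int) - idx := by linarith [hcn1, hbounds.1]
            omega
          rw [show fA = cn + (fA - cn) by omega, walkA_jump v s e cn (fA - cn) idx u hjump]
          have hcs : (v.length : Int) ≤ idx + (cn : Int) * s := by
            rw [hcnc]; linarith [hbounds.2]
          rw [walkA_of_ge v s e (fA - cn) _ _ hcs, walkB_of_ge v s plist res fB _ _ (le_refl _)]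
          rw [hcnc]
    · rw [walkB, if_neg hidx]
      exact walkA_of_ge _ _ _ _ _ _ (by omega)

def posList (vector : List Int) (e : Int) : List Int :=
  ((PySem.List.enumerate vector).filter (fun p => p.2 == e)).map (·.1)

theorem pos_getD (vector : List Int) (e : Int) :
    ((PySem.List.enumerate vector).foldl
      (fun d p => d.modify p.2 [] (fun l => l ++ [p.1])) PySem.Dict.empty).getD e [] =
    posList vector e := by
  rw [show ((PySem.List.enumerate vector).foldl
      (fun d p => d.modify p.2 [] (fun l => l ++ [p.1])) PySem.Dict.empty) =
      (((PySem.List.enumerate vector).map (fun p => (p.2, p.1))).foldl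
      (fun d q => d.modify q.1 [] (fun l => l ++ [q.2])) PySem.Dict.empty) from
    (List.foldl_map (f := fun p : Int × Int => (p.2, p.1))
      (g := fun (d : PySem.Dict Int (List Int)) (q : Int × Int) => d.modify q.1 [] (fun l => l ++ [q.2]))
      (l := PySem.List.enumerate vector) (init := PySem.Dict.empty)).symm]
  rw [PySem.Dict.getD_foldl_modify_append]
  simp [posList, List.filter_map, List.map_map, Function.comp_def]

theorem res_getD (plist : List Int) (s r : Int) :
    (plist.foldl (fun d p => d.modify (PySem.Int.mod p s) [] (fun l => l ++ [p]))
      PySem.Dict.empty).getD r [] =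
    plist.filter (fun p => PySem.Int.mod p s == r) := by
  rw [show (plist.foldl (fun d p => d.modify (PySem.Int.mod p s) [] (fun l => l ++ [p]))
      PySem.Dict.empty) =
      ((plist.map (fun p => (PySem.Int.mod p s, p))).foldl
      (fun d q => d.modify q.1 [] (fun l => l ++ [q.2])) PySem.Dict.empty) from
    (List.foldl_map (f := fun p : Int => (PySem.Int.mod p s, p))
      (g := fun (d : PySem.Dict Int (List Int)) (q : Int × Int) => d.modify q.1 [] (fun l => l ++ [q.2]))
      (l := plist) (init := PySem.Dict.empty)).symm]
  rw [PySem.Dict.getD_foldl_modify_append]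
  simp [List.filter_map, List.map_map, Function.comp_def]

theorem mem_posList (vector : List Int) (e q : Int) :
    q ∈ posList vector e ↔
      0 ≤ q ∧ q < (vector.length : Int) ∧ PySem.List.pyGetD vector q 0 = e := by
  simp only [posList, List.mem_map, List.mem_filter, PySem.List.mem_enumerate_iff]
  constructor
  · rintro ⟨⟨i, x⟩, ⟨⟨k, hk, heq⟩, hx⟩, rfl⟩
    rw [Prod.mk.injEq] at heq
    obtain ⟨h1, h2⟩ := heq
    simp only at h1 h2 hx ⊢
    subst h1
    have hxe : x = e := by simpa using hx
    refine ⟨by omega, by simpa using hk, ?_⟩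
    rw [PySem.List.pyGetD_of_nonneg vector 0 (by omega)]
    rw [show ((0 : Int) + (k : Int)).toNat = k by omega]
    rw [List.getD_eq_getElem vector 0 hk]
    omega
  · rintro ⟨hq0, hqn, hqe⟩
    refine ⟨(q, e), ⟨⟨q.toNat, by omega, ?_⟩, by simp⟩, rfl⟩
    rw [Prod.mk.injEq]
    constructor
    · omega
    · rw [PySem.List.pyGetD_of_nonneg vector 0 hq0] at hqe
      rw [List.getD_eq_getElem vector 0 (by omega)] at hqe
      omega

theorem sorted_posList (vector : List Int) (e : Int) :
    (posList vector e).Pairwise (· < ·) := by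
  unfold posList
  exact List.Pairwise.map (fun p : Int × Int => p.1) (fun a b h => h)
    (List.Pairwise.sublist List.filter_sublist (PySem.List.pairwise_lt_enumerate vector 0))

theorem keys_positions (vector : List Int) :
    ((PySem.List.enumerate vector).foldl
      (fun d p => d.modify p.2 [] (fun l => l ++ [p.1])) PySem.Dict.empty).keys =
    (PySem.Dict.counter (κ := Int) vector).keys := by
  rw [PySem.Dict.keys_foldl_modify_key (PySem.List.enumerate vector) (fun p => p.2) []
        (fun d p l => l ++ [p.1]) PySem.Dict.empty]
  rw [PySem.Dict.keys_counter]
  simp only [PySem.Dict.keys_empty, PySem.List.map_snd_enumerate]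
  rw [PySem.Set.ofList_eq_foldl]
  rfl

theorem nodup_keys_positions (vector : List Int) :
    ((PySem.List.enumerate vector).foldl
      (fun d p => d.modify p.2 [] (fun l => l ++ [p.1])) PySem.Dict.empty).keys.Nodup := by
  exact PySem.Dict.nodup_keys_foldl_modify_key _ _ _ _ _ (by simp [PySem.Dict.nodup_keys_empty])

-- ===== VERDICT (by name: the statement is the Claim_ definition above) =====

theorem equalize_counter_spec : Claim_equal_equalize_counter := by
  unfold Claim_equal_equalize_counter Spec_equalize_counter Pre_equalize_counter
  intro vector step_size _hdom hs
  unfold equalize_counter equalize_counter_alt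
  rw [if_neg (by omega), if_neg (by omega)]
  simp only []
  rw [PySem.Dict.items_eq_map_keys _ (nodup_keys_positions vector) []]
  rw [List.foldl_map]
  rw [keys_positions]
  apply PySem.List.foldl_congr_mem
  intro acc e _he
  simp only []
  rw [pos_getD vector e]
  congr 1
  exact walk_eq vector step_size e (posList vector e) _ hs
    (mem_posList vector e) (sorted_posList vector e)
    (res_getD (posList vector e) step_size)
    vector.length 0 0 vector.length (le_refl 0) (by push_cast; omega) (by push_cast; omega)
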